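-- pv_equiv track=rewrite | github.com/zhomanatr/algo | lesson4.py | countBeatingRooks
-- ===== SOURCE A (Python) =====
-- def countBeatingRooks(rookcoords):
--     def addRook(roworcol, key):
--         if key not in roworcol:
--             roworcol[key] = 0
--         roworcol[key] += 1
--
--     def countPairs(roworcol):
--         pairs = 0
--         for key in roworcol:
--             pairs += roworcol[key] - 1
--         return pairs
--
--     rooksInRow = {}
--     rooksInCol = {}
--
--     for row, col in rookcoords:
--         addRook(rooksInRow, row)
--         addRook(rooksInCol, col)
--     return countPairs(rooksInRow) + countPairs(rooksInCol)
-- ===== SOURCE B (Python) =====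
-- def countBeatingRooks(rookcoords):
--     rows = []
--     cols = []
--     for row, col in rookcoords:
--         rows.append(row)
--         cols.append(col)
--     rows.sort()
--     cols.sort()
--     pairs = 0
--     for a, b in zip(rows, rows[1:]):
--         if a == b:
--             pairs += 1
--     for a, b in zip(cols, cols[1:]):
--         if a == b:
--             pairs += 1
--     return pairs
-- ===== Notes on version B (the rewrite author's own statement) =====
-- stated objective: alternative
-- what changed: B replaces the frequency dicts and the per-key subtract-one loop by a sorting-based algorithm: collect rows and cols in one pass, sort each list, and count adjacent equal neighbours in the sorted order (in a sorted list each extra copy of a value sits next to an equal neighbour, so the adjacent-equal count is exactly sum(count-1)).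
import Mathlib
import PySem

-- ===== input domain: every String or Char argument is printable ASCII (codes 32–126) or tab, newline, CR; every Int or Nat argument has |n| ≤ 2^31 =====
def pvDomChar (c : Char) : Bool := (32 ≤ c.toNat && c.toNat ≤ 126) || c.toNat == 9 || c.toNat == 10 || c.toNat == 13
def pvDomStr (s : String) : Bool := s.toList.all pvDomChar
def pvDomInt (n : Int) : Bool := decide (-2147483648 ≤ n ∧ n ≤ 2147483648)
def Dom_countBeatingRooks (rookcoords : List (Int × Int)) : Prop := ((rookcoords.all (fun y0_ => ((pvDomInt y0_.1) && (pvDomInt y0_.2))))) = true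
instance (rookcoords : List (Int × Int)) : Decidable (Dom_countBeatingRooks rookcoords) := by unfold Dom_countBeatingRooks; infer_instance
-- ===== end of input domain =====

-- B replaces the frequency dicts by a sorting-based algorithm: sort rows and cols,
-- count adjacent equal neighbours in the sorted order (objective: alternative).

-- ===== PORT A =====

-- addRook: if key not in roworcol: roworcol[key] = 0; roworcol[key] += 1
def pvAddRook (roworcol : PySem.Dict Int Int) (key : Int) : PySem.Dict Int Int :=
  let d := if roworcol.contains key then roworcol else roworcol.insert key 0
  d.insert key (d.getD key 0 + 1)

-- countPairs: pairs = 0; for key in roworcol: pairs += roworcol[key] - 1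
def pvCountPairs (roworcol : PySem.Dict Int Int) : Int :=
  roworcol.keys.foldl (fun pairs key => pairs + (roworcol.getD key 0 - 1)) 0

def countBeatingRooks (rookcoords : List (Int × Int)) : Int :=
  let st := rookcoords.foldl
    (fun (st : PySem.Dict Int Int × PySem.Dict Int Int) rc =>
      (pvAddRook st.1 rc.1, pvAddRook st.2 rc.2))
    (PySem.Dict.empty, PySem.Dict.empty)
  pvCountPairs st.1 + pvCountPairs st.2

-- ===== PORT B =====
def countBeatingRooks_alt (rookcoords : List (Int × Int)) : Int :=
  let st := rookcoords.foldl
    (fun (st : List Int × List Int) rc => (st.1 ++ [rc.1], st.2 ++ [rc.2]))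
    ([], [])
  let rows := PySem.List.sorted st.1 (fun x => x) false
  let cols := PySem.List.sorted st.2 (fun x => x) false
  let pairs : Int := 0
  -- for a, b in zip(rows, rows[1:]): if a == b: pairs += 1
  let pairs := (rows.zip (PySem.List.slice rows (some 1) none)).foldl
    (fun pairs ab => if ab.1 == ab.2 then pairs + 1 else pairs) pairs
  let pairs := (cols.zip (PySem.List.slice cols (some 1) none)).foldl
    (fun pairs ab => if ab.1 == ab.2 then pairs + 1 else pairs) pairs
  pairs

-- ===== PRECONDITION & SPEC =====
def Spec_countBeatingRooks (rookcoords : List (Int × Int)) (out : Int) : Prop := out = countBeatingRooks_alt rookcoords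
instance (rookcoords : List (Int × Int)) (out : Int) : Decidable (Spec_countBeatingRooks rookcoords out) := by unfold Spec_countBeatingRooks; infer_instance

-- ===== CLAIM (what is proved, stated in full; the proofs are below) =====
def Claim_equal_countBeatingRooks : Prop := ∀ (rookcoords : List (Int × Int)), Dom_countBeatingRooks rookcoords → Spec_countBeatingRooks rookcoords (countBeatingRooks rookcoords)

-- ===== LEMMAS AND PROOFS =====

-- ---- A side: A computes |xs| - |set(xs)| per coordinate ----

-- A's addRook is a counter step.
theorem pvAddRook_eq (d : PySem.Dict Int Int) (k : Int) :
    pvAddRook d k = d.insert k (d.getD k 0 + 1) := by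
  unfold pvAddRook
  by_cases h : d.contains k = true
  · simp [h]
  · simp only [h, Bool.false_eq_true, if_false, PySem.Dict.insert_insert_self,
      PySem.Dict.getD_insert_self]
    rw [PySem.Dict.getD_of_not_contains]
    simpa using h

-- the paired fold splits into two independent folds over the projections
theorem pvPairFold (l : List (Int × Int)) (d1 d2 : PySem.Dict Int Int) :
    l.foldl (fun (st : PySem.Dict Int Int × PySem.Dict Int Int) rc =>
        (pvAddRook st.1 rc.1, pvAddRook st.2 rc.2)) (d1, d2)
      = ((l.map Prod.fst).foldl pvAddRook d1, (l.map Prod.snd).foldl pvAddRook d2) := by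
  induction l generalizing d1 d2 with
  | nil => rfl
  | cons x xs ih => simp [List.foldl_cons, ih]

-- fold of pvAddRook from empty is Counter
theorem pvFold_eq_counter (xs : List Int) :
    xs.foldl pvAddRook PySem.Dict.empty = PySem.Dict.counter xs := by
  have h : xs.foldl pvAddRook PySem.Dict.empty
      = xs.foldl (fun d x => d.insert x (d.getD x 0 + 1)) PySem.Dict.empty := by
    apply PySem.List.foldl_congr_mem
    intro d x _; exact pvAddRook_eq d x
  rw [h, PySem.Dict.foldl_insert_getD_add_one_eq_counter]

-- the countPairs fold is a sum
theorem pvCountPairs_foldl (d : PySem.Dict Int Int) (l : List Int) (a : Int) :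
    l.foldl (fun pairs key => pairs + (d.getD key 0 - 1)) a
      = a + (l.map (fun k => d.getD k 0)).sum - l.length := by
  induction l generalizing a with
  | nil => simp
  | cons x xs ih => simp [List.foldl_cons, ih]; ring

-- PySem.Set.ofList xs is a permutation of Mathlib's xs.dedup
theorem pvOfList_perm_dedup (xs : List Int) :
    (PySem.Set.ofList xs).Perm xs.dedup := by
  rw [List.perm_ext_iff_of_nodup (PySem.Set.nodup_ofList xs) xs.nodup_dedup]
  intro a; simp [PySem.Set.mem_ofList, List.mem_dedup]

-- sum of multiplicities over the set of a list is its length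
theorem pvSumCounts (xs : List Int) :
    ((PySem.Set.ofList xs).map (fun k => (xs.count k : Int))).sum = (xs.length : Int) := by
  have := ((pvOfList_perm_dedup xs).map (fun k => (xs.count k : Int))).sum_eq
  rw [this]
  have hnat : (xs.dedup.map fun x => xs.count x).sum = xs.length :=
    List.sum_map_count_dedup_eq_length xs
  calc (xs.dedup.map fun k => (xs.count k : Int)).sum
      = ((xs.dedup.map fun x => xs.count x).map (Nat.cast : Nat → Int)).sum := by
        rw [List.map_map]; rfl
    _ = ((xs.dedup.map fun x => xs.count x).sum : Int) := (Nat.cast_list_sum _).symm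
    _ = (xs.length : Int) := by rw [hnat]

-- countPairs of the counter of xs = |xs| - |set(xs)|
theorem pvCountPairs_counter (xs : List Int) :
    pvCountPairs (PySem.Dict.counter xs)
      = (xs.length : Int) - (PySem.Set.ofList xs).length := by
  unfold pvCountPairs
  rw [PySem.Dict.keys_counter, pvCountPairs_foldl]
  have : ((PySem.Set.ofList xs).map fun k => (PySem.Dict.counter xs).getD k 0)
      = (PySem.Set.ofList xs).map (fun k => (xs.count k : Int)) := by
    apply List.map_congr_left; intro k _; exact PySem.Dict.getD_counter xs k
  rw [this, pvSumCounts]; ring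

-- ---- B side: adjacent duplicates in a sorted list = |xs| - |set(xs)| ----

-- number of adjacent equal neighbours, structurally
def pvAdjCnt : List Int → Nat
  | [] => 0
  | [_] => 0
  | a :: b :: t => (if a = b then 1 else 0) + pvAdjCnt (b :: t)

theorem pvAdjCnt_cons2 (a b : Int) (t : List Int) :
    pvAdjCnt (a :: b :: t) = (if a = b then 1 else 0) + pvAdjCnt (b :: t) := rfl

-- B's zip fold computes pvAdjCnt
theorem pvZipFold (xs : List Int) (p : Int) :
    (xs.zip xs.tail).foldl
        (fun pairs ab => if ab.1 == ab.2 then pairs + 1 else pairs) p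
      = p + pvAdjCnt xs := by
  induction xs generalizing p with
  | nil => simp [pvAdjCnt]
  | cons a xs ih =>
    cases xs with
    | nil => simp [pvAdjCnt]
    | cons b t =>
      simp only [List.tail_cons, List.zip_cons_cons, List.foldl_cons]
      rw [show ((b :: t).zip t) = ((b :: t).zip (b :: t).tail) from by simp, ih]
      rw [pvAdjCnt_cons2]
      by_cases h : a = b
      · simp [h]; ring
      · simp [h]

-- in a ≤-sorted list, adjacent-equal count + distinct count = length
theorem pvAdjCnt_sorted (xs : List Int) (hs : xs.Pairwise (· ≤ ·)) :
    pvAdjCnt xs + xs.dedup.length = xs.length := by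
  induction xs with
  | nil => simp [pvAdjCnt]
  | cons a xs ih =>
    cases xs with
    | nil => simp [pvAdjCnt]
    | cons b t =>
      have hs' : (b :: t).Pairwise (· ≤ ·) := hs.tail
      have hab : a ≤ b := (List.pairwise_cons.mp hs).1 b (by simp)
      by_cases h : a = b
      · have hmem : a ∈ b :: t := by simp [h]
        rw [List.dedup_cons_of_mem hmem, pvAdjCnt_cons2]
        simp only [if_pos h, List.length_cons]
        have hx := ih hs'
        simp only [List.length_cons] at hx
        omega
      · have hmem : a ∉ b :: t := by
          intro hm
          rcases List.mem_cons.mp hm with h1 | h2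
          · exact h h1
          · have hbt : b ≤ a := (List.pairwise_cons.mp hs').1 a h2
            exact h (le_antisymm hab hbt)
        rw [List.dedup_cons_of_notMem hmem, pvAdjCnt_cons2]
        simp only [if_neg h, List.length_cons]
        have hx := ih hs'
        simp only [List.length_cons] at hx
        omega

-- the adjacent-equal count of sorted(xs) is |xs| - |set(xs)|
theorem pvAdjCnt_sorted_eq (xs : List Int) :
    (pvAdjCnt (PySem.List.sorted xs (fun x => x) false) : Int)
      = (xs.length : Int) - (PySem.Set.ofList xs).length := by
  set s := PySem.List.sorted xs (fun x => x) false with hsdef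
  have hperm : s.Perm xs := PySem.List.sorted_perm xs (fun x => x) false
  have hpw : s.Pairwise (· ≤ ·) := by
    have := PySem.List.sorted_pairwise xs (fun x => x)
    simpa [hsdef] using this
  have h1 := pvAdjCnt_sorted s hpw
  have hd : s.dedup.length = xs.dedup.length := hperm.dedup.length_eq
  have hl : s.length = xs.length := hperm.length_eq
  have hset : (PySem.Set.ofList xs).length = xs.dedup.length :=
    (pvOfList_perm_dedup xs).length_eq
  omega

-- B's collecting fold is the pair of projections
theorem pvCollect (l : List (Int × Int)) (r c : List Int) :
    l.foldl (fun (st : List Int × List Int) rc => (st.1 ++ [rc.1], st.2 ++ [rc.2])) (r, c)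
      = (r ++ l.map Prod.fst, c ++ l.map Prod.snd) := by
  induction l generalizing r c with
  | nil => simp
  | cons x xs ih => simp [List.foldl_cons, ih]

-- ===== VERDICT (by name: the statement is the Claim_ definition above) =====
theorem countBeatingRooks_spec : Claim_equal_countBeatingRooks := by
  intro rookcoords _
  unfold Spec_countBeatingRooks countBeatingRooks countBeatingRooks_alt
  rw [pvPairFold, pvCollect]
  simp only [List.nil_append, PySem.List.slice_from_one]
  rw [pvFold_eq_counter, pvFold_eq_counter, pvCountPairs_counter, pvCountPairs_counter,
    pvZipFold, pvZipFold, pvAdjCnt_sorted_eq, pvAdjCnt_sorted_eq]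
  ring
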